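-- pv_equiv track=rewrite | github.com/MaxSpass/RaidSL-Telegram-Bot-code | helpers/common.py | archive_list
-- ===== SOURCE A (Python) =====
-- def archive_list(input_list, pattern):
--     result = []
--     index = 0
--
--     for group_size in pattern:
--         group = input_list[index:index + group_size]
--         result.append(group)
--         index += group_size
--
--     return result
-- ===== SOURCE B (Python) =====
-- def archive_list(input_list, pattern):
--     offsets = [0]
--     for group_size in pattern:
--         offsets.append(offsets[-1] + group_size)
--     return [input_list[lo:hi] for lo, hi in zip(offsets, offsets[1:])]
-- ===== Notes on version B (the rewrite author's own statement) =====
-- stated objective: idiomatic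
-- what changed: B first builds a cumulative-offset table from the pattern and then slices the list between each pair of adjacent boundaries, instead of maintaining a running index and appending inside one loop.
import Mathlib
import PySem

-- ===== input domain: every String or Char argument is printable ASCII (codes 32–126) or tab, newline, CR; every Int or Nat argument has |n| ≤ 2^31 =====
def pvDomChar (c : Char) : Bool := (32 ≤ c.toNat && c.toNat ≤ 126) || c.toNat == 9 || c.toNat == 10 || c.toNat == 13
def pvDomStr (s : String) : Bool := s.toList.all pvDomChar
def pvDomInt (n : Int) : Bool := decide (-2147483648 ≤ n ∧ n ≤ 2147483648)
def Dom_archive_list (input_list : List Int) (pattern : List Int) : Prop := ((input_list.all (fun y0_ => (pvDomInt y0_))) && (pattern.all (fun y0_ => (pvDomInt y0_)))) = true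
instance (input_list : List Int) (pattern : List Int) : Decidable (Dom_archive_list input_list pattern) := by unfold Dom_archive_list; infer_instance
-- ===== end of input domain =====

-- B builds a cumulative-offset table and slices between adjacent boundaries (different decomposition, same cost).


-- ===== PORT A =====
-- loop state (result, index); each step appends input_list[index:index+group_size] and advances index
def archive_list (input_list : List Int) (pattern : List Int) : List (List Int) :=
  (pattern.foldl
    (fun (st : List (List Int) × Int) group_size =>
      (st.1 ++ [PySem.List.slice input_list (some st.2) (some (st.2 + group_size))],
       st.2 + group_size))
    ([], 0)).1

-- ===== PORT B =====
-- B: offsets = cumulative sums of pattern (the loop appending offsets[-1]+g), then slice adjacent pairs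
def altOffsets : List Int → Int → List Int
  | [], acc => [acc]
  | g :: rest, acc => acc :: altOffsets rest (acc + g)

def archive_list_alt (input_list : List Int) (pattern : List Int) : List (List Int) :=
  let offsets := altOffsets pattern 0
  (offsets.zip offsets.tail).map (fun p => PySem.List.slice input_list (some p.1) (some p.2))

-- ===== PRECONDITION & SPEC =====
def Spec_archive_list (input_list : List Int) (pattern : List Int) (out : List (List Int)) : Prop := out = archive_list_alt input_list pattern
instance (input_list : List Int) (pattern : List Int) (out : List (List Int)) : Decidable (Spec_archive_list input_list pattern out) := by unfold Spec_archive_list; infer_instance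

-- ===== CLAIM (what is proved, stated in full; the proofs are below) =====
def Claim_equal_archive_list : Prop := ∀ (input_list : List Int) (pattern : List Int), Dom_archive_list input_list pattern → Spec_archive_list input_list pattern (archive_list input_list pattern)

-- ===== LEMMAS AND PROOFS =====

-- ===== VERDICT (by name: the statement is the Claim_ definition above) =====
-- generalized loop invariant: the A-fold from any (res, idx) equals res ++ B's zip-map from offset idx
theorem archive_foldl_eq (input_list : List Int) :
    ∀ (pattern : List Int) (res : List (List Int)) (idx : Int),
      (pattern.foldl
        (fun (st : List (List Int) × Int) group_size =>
          (st.1 ++ [PySem.List.slice input_list (some st.2) (some (st.2 + group_size))],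
           st.2 + group_size))
        (res, idx)).1
      = res ++ ((altOffsets pattern idx).zip (altOffsets pattern idx).tail).map
          (fun p => PySem.List.slice input_list (some p.1) (some p.2)) := by
  intro pattern
  induction pattern with
  | nil => intro res idx; simp [altOffsets]
  | cons g rest ih =>
    intro res idx
    simp only [List.foldl_cons, altOffsets]
    rw [ih]
    cases rest with
    | nil => simp [altOffsets]
    | cons g' rest' => simp [altOffsets]

theorem archive_list_spec : Claim_equal_archive_list := by
  intro input_list pattern _
  unfold Spec_archive_list archive_list archive_list_alt
  rw [archive_foldl_eq]
  simp
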